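-- pv_equiv track=rewrite | github.com/davidlarrimore/curatore-v2 | backend/app/core/storage/zip_service.py | _adjust_markdown_hierarchy
-- ===== SOURCE A (Python) =====
-- def _adjust_markdown_hierarchy(content: str) -> str:
--     """
--     Adjust markdown header hierarchy by adding one level of nesting.
--
--     Modifies markdown headers to increase their nesting level by one (adds one #)
--     to prevent conflicts when multiple documents are combined into a single file.
--
--     Args:
--         content (str): Original markdown content with existing headers
--
--     Returns:
--         str: Modified markdown content with adjusted header hierarchy
--     """
--     if not content:
--         return content
--
--     lines = content.split('\n')
--     adjusted_lines = []
--
--     for line in lines: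
--         # Check if line starts with markdown headers
--         header_match = line.strip()
--         if header_match.startswith('#') and not header_match.startswith('######'):
--             # Find the header level
--             header_level = 0
--             for char in header_match:
--                 if char == '#':
--                     header_level += 1
--                 else:
--                     break
--
--             if header_level < 6:  # Don't exceed maximum header depth
--                 # Add one more # to increase nesting level
--                 adjusted_line = '#' + line
--                 adjusted_lines.append(adjusted_line)
--             else:
--                 adjusted_lines.append(line)
--         else:
--             adjusted_lines.append(line)
--
--     return '\n'.join(adjusted_lines)
-- ===== SOURCE B (Python) =====
-- def _adjust_markdown_hierarchy(content: str) -> str: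
--     # One pass over the characters: at each line start, a same-line lookahead
--     # (skip whitespace, measure the '#' run) decides whether to insert one '#'
--     # at column 0; then the line is copied verbatim. No split/strip/join.
--     out = []
--     i = 0
--     n = len(content)
--     while i < n:
--         # lookahead: skip intra-line whitespace, then count the '#' run
--         j = i
--         while j < n and content[j] in ' \t\r\x0b\x0c':
--             j += 1
--         k = j
--         while k < n and content[k] == '#':
--             k += 1
--         if j < k and k - j <= 5:
--             out.append('#')
--         # copy the line body and its newline, if any
--         while i < n and content[i] != '\n':
--             out.append(content[i])
--             i += 1
--         if i < n:
--             out.append('\n')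
--             i += 1
--     return ''.join(out)
-- ===== Notes on version B (the rewrite author's own statement) =====
-- stated objective: alternative
-- what changed: Replaced A's split-into-lines / strip / count-and-rebuild / join pipeline with a single left-to-right pass over the characters: at each line start a same-line lookahead (skip whitespace, measure the run of 1-5 hash characters) decides whether to insert one extra hash at column 0, then the line is copied verbatim.
import Mathlib
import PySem

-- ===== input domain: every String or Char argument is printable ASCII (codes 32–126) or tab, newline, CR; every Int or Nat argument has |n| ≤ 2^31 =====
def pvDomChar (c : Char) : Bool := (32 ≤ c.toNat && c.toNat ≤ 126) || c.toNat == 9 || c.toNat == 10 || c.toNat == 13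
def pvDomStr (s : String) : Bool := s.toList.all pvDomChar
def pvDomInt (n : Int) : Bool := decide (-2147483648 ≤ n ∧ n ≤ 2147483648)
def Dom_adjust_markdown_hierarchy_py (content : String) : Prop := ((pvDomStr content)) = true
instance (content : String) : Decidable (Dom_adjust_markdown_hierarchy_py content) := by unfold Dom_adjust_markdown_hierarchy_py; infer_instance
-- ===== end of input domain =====

-- B replaces A's split/strip/count/join pipeline with a single pass over the characters
-- (a line-start lookahead decides the inserted '#'); objective: alternative decomposition.

-- ===== PORT A =====

-- the inner 'for char in header_match: if char == '#': … else: break' loop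
def pvA_headerLevel : List Char → Nat
  | [] => 0
  | c :: cs => if c = '#' then pvA_headerLevel cs + 1 else 0

-- the body of A's per-line loop iteration
def pvA_adjLine (line : List Char) : List Char :=
  let header_match := PySem.Chars.strip line
  if PySem.Chars.startswith header_match ['#']
      && !PySem.Chars.startswith header_match ['#','#','#','#','#','#'] then
    if pvA_headerLevel header_match < 6 then '#' :: line else line
  else line

def adjust_markdown_hierarchy_py (content : String) : String :=
  if content = "" then content
  else
    let lines := PySem.Chars.splitOn content.toList ['\n']
    let adjusted_lines := lines.foldl (fun acc line => acc ++ [pvA_adjLine line]) []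
    String.ofList (PySem.Chars.join ['\n'] adjusted_lines)

-- ===== PORT B =====

-- Source B: content[j] in ' \t\r\x0b\x0c'
def pvB_ws (c : Char) : Bool := c = ' ' || c = '\t' || c = '\r' || c = '\x0b' || c = '\x0c'

-- Source B's while-loop over i, one recursion step per line (the two inner index
-- scans become dropWhile/takeWhile over the same characters)
def pvB_go : List Char → List Char
  | [] => []
  | c :: cs =>
    let after := (c :: cs).dropWhile pvB_ws
    let h := (after.takeWhile (fun x => x = '#')).length
    let line := (c :: cs).takeWhile (fun x => x ≠ '\n')
    let body := if 1 ≤ h ∧ h ≤ 5 then '#' :: line else line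
    let rest := (c :: cs).dropWhile (fun x => x ≠ '\n')
    if _hr : rest = [] then body
    else body ++ '\n' :: pvB_go rest.tail
  termination_by cs => cs.length
  decreasing_by
    have h1 : ((c :: cs).dropWhile (fun x => x ≠ '\n')).length ≤ (c :: cs).length :=
      List.length_dropWhile_le _ _
    have h2 : rest ≠ [] := _hr
    have h3 : rest.tail.length = rest.length - 1 := by
      cases rest with
      | nil => simp
      | cons d r => simp
    have h4 : 1 ≤ rest.length := List.length_pos_of_ne_nil h2
    simp only [rest] at h3 h4
    simp at h1 ⊢
    omega

def adjust_markdown_hierarchy_py_alt (content : String) : String :=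
  String.ofList (pvB_go content.toList)

-- ===== PRECONDITION & SPEC =====
def Spec_adjust_markdown_hierarchy_py (content : String) (out : String) : Prop := out = adjust_markdown_hierarchy_py_alt content
instance (content : String) (out : String) : Decidable (Spec_adjust_markdown_hierarchy_py content out) := by unfold Spec_adjust_markdown_hierarchy_py; infer_instance

-- ===== CLAIM (what is proved, stated in full; the proofs are below) =====
def Claim_equal_adjust_markdown_hierarchy_py : Prop := ∀ (content : String), Dom_adjust_markdown_hierarchy_py content → Spec_adjust_markdown_hierarchy_py content (adjust_markdown_hierarchy_py content)

-- ===== LEMMAS AND PROOFS =====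

-- reference splitter: split at every '\n'
def pvConsHead (x : List Char) : List (List Char) → List (List Char)
  | [] => [x]
  | h :: t => (x ++ h) :: t

def pvSplitN : List Char → List (List Char)
  | [] => [[]]
  | c :: r => if c = '\n' then [] :: pvSplitN r else pvConsHead [c] (pvSplitN r)

theorem pvSplitN_ne_nil (l : List Char) : pvSplitN l ≠ [] := by
  match l with
  | [] => simp [pvSplitN]
  | c :: r =>
    simp only [pvSplitN]; split
    · simp
    · cases h : pvSplitN r <;> simp [pvConsHead]

theorem pvGo_eq (fuel : Nat) (l cur : List Char) (acc : List (List Char))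
    (h : l.length < fuel) :
    PySem.Chars.splitOn.go ['\n'] fuel l cur acc
      = acc.reverse ++ pvConsHead cur.reverse (pvSplitN l) := by
  induction fuel generalizing l cur acc with
  | zero => omega
  | succ fuel ih =>
    rw [PySem.Chars.splitOn.go.eq_def]
    match l with
    | [] => simp [pvSplitN, pvConsHead]
    | c :: rest =>
      simp only []
      by_cases hc : c = '\n'
      · subst hc
        have hp : List.isPrefixOf ['\n'] ('\n' :: rest) = true := by
          simp [List.isPrefixOf]
        rw [if_pos hp]
        rw [ih _ _ _ (by simp at h ⊢; omega)]
        have hne := pvSplitN_ne_nil rest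
        cases hr : pvSplitN rest with
        | nil => exact absurd hr hne
        | cons a t =>
          simp [pvSplitN, pvConsHead, hr, List.isPrefixOf]
      · have hp : List.isPrefixOf ['\n'] (c :: rest) = false := by
          simp [List.isPrefixOf]; exact fun hh => absurd hh.symm hc
        rw [if_neg (by simp [hp])]
        rw [ih _ _ _ (by simp at h ⊢; omega)]
        have hne := pvSplitN_ne_nil rest
        cases hr : pvSplitN rest with
        | nil => exact absurd hr hne
        | cons a t =>
          simp [pvSplitN, pvConsHead, hr, hc]

theorem pvSplitOn_eq (l : List Char) :
    PySem.Chars.splitOn l ['\n'] = pvSplitN l := by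
  unfold PySem.Chars.splitOn
  rw [pvGo_eq _ _ _ _ (by omega)]
  have hne := pvSplitN_ne_nil l
  cases hr : pvSplitN l with
  | nil => exact absurd hr hne
  | cons a t => simp [pvConsHead]

theorem pvSplitN_decomp (cs : List Char) :
    pvSplitN cs = cs.takeWhile (fun x => x ≠ '\n')
      :: (match cs.dropWhile (fun x => x ≠ '\n') with
          | [] => [] | _ :: r => pvSplitN r) := by
  induction cs with
  | nil => simp [pvSplitN]
  | cons c r ih =>
    by_cases hc : c = '\n'
    · subst hc; simp [pvSplitN, List.takeWhile_cons, List.dropWhile_cons]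
    · simp only [pvSplitN, if_neg hc, List.takeWhile_cons, List.dropWhile_cons]
      simp only [hc, decide_not, decide_eq_true_eq, if_pos, ih]
      simp [pvConsHead, hc]

theorem pv_headerLevel_eq (l : List Char) :
    pvA_headerLevel l = (l.takeWhile (fun x => x = '#')).length := by
  induction l with
  | nil => simp [pvA_headerLevel]
  | cons c cs ih =>
    by_cases hc : c = '#' <;> simp [pvA_headerLevel, List.takeWhile_cons, hc, ih]

theorem pv_replicate_prefix (k : Nat) (l : List Char) :
    (List.replicate k '#').isPrefixOf l = true ↔ k ≤ (l.takeWhile (fun x => x = '#')).length := by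
  induction k generalizing l with
  | zero => simp [List.isPrefixOf]
  | succ k ih =>
    cases l with
    | nil => simp [List.isPrefixOf]
    | cons c cs =>
      by_cases hc : c = '#'
      · subst hc
        simp [List.replicate_succ, List.isPrefixOf, List.takeWhile_cons, ih]
      · simp [List.replicate_succ, List.isPrefixOf, List.takeWhile_cons, hc]
        exact fun hh => absurd hh.symm hc

theorem pv_hash_takeWhile_line (l : List Char) :
    (l.takeWhile (fun x => x ≠ '\n')).takeWhile (fun x => x = '#')
      = l.takeWhile (fun x => x = '#') := by
  rw [List.takeWhile_takeWhile]
  congr 1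
  funext a
  by_cases ha : a = '#'
  · subst ha; simp
  · simp [ha]

theorem pv_ws_ne_nl {c : Char} (h : pvB_ws c = true) : c ≠ '\n' := by
  unfold pvB_ws at h
  simp only [Bool.or_eq_true, decide_eq_true_eq] at h
  rcases h with ((((h|h)|h)|h)|h) <;> subst h <;> decide

theorem pv_lookahead_local (cs : List Char) :
    (cs.dropWhile pvB_ws).takeWhile (fun x => x = '#')
      = ((cs.takeWhile (fun x => x ≠ '\n')).dropWhile pvB_ws).takeWhile (fun x => x = '#') := by
  induction cs with
  | nil => simp
  | cons c cs ih =>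
    by_cases hw : pvB_ws c
    · have hnl : c ≠ '\n' := pv_ws_ne_nl hw
      simp only [List.dropWhile_cons, List.takeWhile_cons, hw, if_pos, hnl, decide_not,
        decide_eq_true_eq, not_false_iff]
      simpa [hw, hnl] using ih
    · by_cases hnl : c = '\n'
      · subst hnl
        have : pvB_ws '\n' = false := by decide
        simp [List.dropWhile_cons, List.takeWhile_cons, this]
      · by_cases hc : c = '#'
        · subst hc
          have h1 : pvB_ws '#' = false := by decide
          have h2 := pv_hash_takeWhile_line cs
          simp only [decide_not] at h2
          simp [List.dropWhile_cons, List.takeWhile_cons, h1, hnl, h2]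
        · simp [List.dropWhile_cons, List.takeWhile_cons, hw, hnl, hc]

theorem pv_char_eq_iff (c d : Char) : (c = d) ↔ (c.toNat = d.toNat) :=
  ⟨fun h => h ▸ rfl, fun h => Char.ext (UInt32.toNat_inj.mp h)⟩

theorem pv_dom_ws {c : Char} (h1 : pvDomChar c = true) (h2 : c ≠ '\n') :
    PySem.Chars.isspace c = pvB_ws c := by
  unfold pvDomChar at h1
  have hnl : c.toNat ≠ 10 := fun h => h2 ((pv_char_eq_iff c '\n').mpr h)
  unfold PySem.Chars.isspace pvB_ws
  simp only [pv_char_eq_iff, Bool.or_eq_true, Bool.and_eq_true, decide_eq_true_eq,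
    beq_iff_eq] at h1 ⊢
  rw [Bool.eq_iff_iff]
  simp only [show (' ').toNat = 32 from rfl, show ('\t').toNat = 9 from rfl,
    show ('\x0d').toNat = 13 from rfl, show ('\x0b').toNat = 11 from rfl,
    show ('\x0c').toNat = 12 from rfl, Bool.or_eq_true, Bool.and_eq_true, decide_eq_true_eq]
  constructor <;> intro h <;> omega

theorem pv_dropWhile_congr {p q : Char → Bool} (l : List Char)
    (h : ∀ c ∈ l, p c = q c) : l.dropWhile p = l.dropWhile q := by
  induction l with
  | nil => rfl
  | cons c cs ih =>
    have hc := h c (by simp)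
    by_cases hp : p c
    · rw [List.dropWhile_cons, List.dropWhile_cons, if_pos hp, if_pos (hc ▸ hp),
        ih (fun d hd => h d (by simp [hd]))]
    · rw [List.dropWhile_cons, List.dropWhile_cons, if_neg hp, if_neg (hc ▸ hp)]

theorem pv_head_dropWhile {α : Type} (p : α → Bool) (l : List α) (x : α) (xs : List α)
    (h : l.dropWhile p = x :: xs) : p x = false := by
  induction l with
  | nil => simp at h
  | cons c cs ih =>
    rw [List.dropWhile_cons] at h
    by_cases hp : p c
    · exact ih (by simpa [hp] using h)
    · rw [if_neg hp] at h
      cases h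
      simpa using hp

theorem pv_rstrip_hash (m : List Char) :
    (PySem.Chars.rstrip m).takeWhile (fun x => x = '#')
      = m.takeWhile (fun x => x = '#') := by
  set p : Char → Bool := fun x => x = '#' with hp
  set a : List Char := m.takeWhile p with ha
  set b : List Char := m.dropWhile p with hb
  have hmem : ∀ c ∈ a, c = '#' := fun c hc => by
    have := List.mem_takeWhile_imp hc; simpa [hp] using this
  have haa : a.takeWhile p = a :=
    List.takeWhile_eq_self_iff.mpr (fun c hc => by simp [hp, hmem c hc])
  have hbr : ∀ x xs, b = x :: xs → p x = false := fun x xs hx =>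
    pv_head_dropWhile p m x xs (by rw [← hb]; exact hx)
  have hadrop : List.dropWhile PySem.Chars.isspace a.reverse = a.reverse := by
    cases har : a.reverse with
    | nil => simp
    | cons x xs =>
      have hx : x = '#' := hmem x (by rw [← List.mem_reverse, har]; simp)
      rw [List.dropWhile_cons, if_neg (by subst hx; decide)]
  have hm : m = a ++ b := (List.takeWhile_append_dropWhile).symm
  rw [hm]
  unfold PySem.Chars.rstrip
  rw [List.reverse_append, List.dropWhile_append]
  have htab : (a ++ b).takeWhile p = a ++ b.takeWhile p := by
    rw [List.takeWhile_append, if_pos (by rw [haa])]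
  have htb : b.takeWhile p = [] := by
    cases hbb : b with
    | nil => simp
    | cons x xs => rw [List.takeWhile_cons, if_neg (by simp [hbr x xs hbb])]
  by_cases he : (List.dropWhile PySem.Chars.isspace b.reverse).isEmpty
  · rw [if_pos he, hadrop, List.reverse_reverse, haa]
  · rw [if_neg he, List.reverse_append, List.reverse_reverse,
      List.takeWhile_append, if_pos (by rw [haa])]
    have hsuff : (List.dropWhile PySem.Chars.isspace b.reverse).reverse <+: b := by
      have := List.dropWhile_suffix (l := b.reverse) PySem.Chars.isspace
      have := List.reverse_prefix.mpr this
      simpa using this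
    cases hrb : (List.dropWhile PySem.Chars.isspace b.reverse).reverse with
    | nil => rw [List.reverse_eq_nil_iff] at hrb; simp [hrb] at he
    | cons x xs =>
      rw [List.takeWhile_cons, if_neg ?_]
      · simp
      rw [hrb] at hsuff
      obtain ⟨t, ht⟩ := hsuff
      have : p x = false := hbr x (xs ++ t) (by rw [← ht]; simp)
      simp [this]

theorem pv_adjLine_eq (line : List Char) (hdom : ∀ c ∈ line, pvDomChar c = true)
    (hnl : '\n' ∉ line) :
    pvA_adjLine line
      = (if 1 ≤ ((line.dropWhile pvB_ws).takeWhile (fun x => x = '#')).length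
            ∧ ((line.dropWhile pvB_ws).takeWhile (fun x => x = '#')).length ≤ 5
         then '#' :: line else line) := by
  have hcong : line.dropWhile PySem.Chars.isspace = line.dropWhile pvB_ws :=
    pv_dropWhile_congr line (fun c hc => pv_dom_ws (hdom c hc) (fun h => hnl (h ▸ hc)))
  have htw : (PySem.Chars.strip line).takeWhile (fun x => x = '#')
      = (line.dropWhile pvB_ws).takeWhile (fun x => x = '#') := by
    unfold PySem.Chars.strip PySem.Chars.lstrip
    rw [hcong]; exact pv_rstrip_hash _
  unfold pvA_adjLine PySem.Chars.startswith
  set L := ((line.dropWhile pvB_ws).takeWhile (fun x => x = '#')).length with hL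
  have h1 : (List.isPrefixOf ['#'] (PySem.Chars.strip line)) = decide (1 ≤ L) := by
    rw [Bool.eq_iff_iff]; simp only [decide_eq_true_eq]
    rw [show (['#'] : List Char) = List.replicate 1 '#' from rfl, pv_replicate_prefix, htw]
  have h6 : (List.isPrefixOf ['#','#','#','#','#','#'] (PySem.Chars.strip line)) = decide (6 ≤ L) := by
    rw [Bool.eq_iff_iff]; simp only [decide_eq_true_eq]
    rw [show (['#','#','#','#','#','#'] : List Char) = List.replicate 6 '#' from rfl,
      pv_replicate_prefix, htw]
  have hlev : pvA_headerLevel (PySem.Chars.strip line) = L := by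
    rw [pv_headerLevel_eq, htw]
  simp only [h1, h6, hlev]
  simp only [Bool.and_eq_true, Bool.not_eq_eq_eq_not, Bool.not_true, decide_eq_true_eq,
    decide_eq_false_iff_not]
  split_ifs <;> first | rfl | omega

theorem pv_line_body (c : Char) (cs : List Char)
    (hdom : ∀ x ∈ c :: cs, pvDomChar x = true) :
    (if 1 ≤ (((c :: cs).dropWhile pvB_ws).takeWhile (fun x => x = '#')).length
        ∧ (((c :: cs).dropWhile pvB_ws).takeWhile (fun x => x = '#')).length ≤ 5
     then '#' :: (c :: cs).takeWhile (fun x => x ≠ '\n')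
     else (c :: cs).takeWhile (fun x => x ≠ '\n'))
      = pvA_adjLine ((c :: cs).takeWhile (fun x => x ≠ '\n')) := by
  rw [pv_lookahead_local (c :: cs)]
  exact (pv_adjLine_eq ((c :: cs).takeWhile (fun x => x ≠ '\n'))
      (fun x hx => hdom x ((List.takeWhile_sublist _).subset hx))
      (fun hx => by simpa using List.mem_takeWhile_imp hx)).symm

theorem pv_main (cs : List Char) (hdom : ∀ c ∈ cs, pvDomChar c = true) :
    pvB_go cs = PySem.Chars.join ['\n'] ((pvSplitN cs).map pvA_adjLine) := by
  induction hlen : cs.length using Nat.strong_induction_on generalizing cs with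
  | _ n ih =>
    cases cs with
    | nil =>
      have h0 : pvA_adjLine [] = [] := by decide
      simp [pvB_go, pvSplitN, PySem.Chars.join_singleton, h0]
    | cons c cs =>
      rw [pvB_go]
      rw [pvSplitN_decomp (c :: cs)]
      by_cases hr : (c :: cs).dropWhile (fun x => x ≠ '\n') = []
      · rw [dif_pos hr, hr]
        simp only [List.map_cons, List.map_nil, PySem.Chars.join_singleton]
        exact pv_line_body c cs hdom
      · rw [dif_neg hr]
        cases hrest : (c :: cs).dropWhile (fun x => x ≠ '\n') with
        | nil => exact absurd hrest hr
        | cons d r =>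
          have hsuff : d :: r <:+ c :: cs := hrest ▸ List.dropWhile_suffix _
          have hdomr : ∀ x ∈ r, pvDomChar x = true := fun x hx =>
            hdom x (hsuff.subset (by simp [hx]))
          have hlt : r.length < n := by
            have h1 := List.length_dropWhile_le (fun x => decide (x ≠ '\n')) (c :: cs)
            rw [hrest] at h1
            simp at h1
            have h2 : cs.length + 1 = n := by simpa using hlen
            omega
          have ihr := ih r.length hlt r hdomr rfl
          simp only [List.tail_cons]
          have hne := pvSplitN_ne_nil r
          cases hsr : pvSplitN r with
          | nil => exact absurd hsr hne
          | cons p t =>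
            simp only [List.map_cons, PySem.Chars.join_cons_cons]
            rw [hsr] at ihr
            simp only [List.map_cons] at ihr
            rw [ihr, pv_line_body c cs hdom]
            simp

-- ===== VERDICT (by name: the statement is the Claim_ definition above) =====
theorem adjust_markdown_hierarchy_py_spec : Claim_equal_adjust_markdown_hierarchy_py := by
  intro content hdom
  unfold Spec_adjust_markdown_hierarchy_py adjust_markdown_hierarchy_py adjust_markdown_hierarchy_py_alt
  have hdom' : ∀ c ∈ content.toList, pvDomChar c = true := by
    have := hdom; unfold Dom_adjust_markdown_hierarchy_py pvDomStr at this
    simpa [List.all_eq_true] using this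
  by_cases hE : content = ""
  · subst hE; simp [pvB_go]
  · rw [if_neg hE]
    simp only [PySem.List.foldl_append_singleton_eq_map, List.nil_append]
    rw [pvSplitOn_eq, ← pv_main _ hdom']
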